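-- pv_equiv track=rewrite | github.com/cybelewang/leetcode-python | Companies/microsoft_footballScore.py | football_score_combinations
-- ===== SOURCE A (Python) =====
-- def football_score_combinations(total):
--     points = [2, 3, 6, 7, 8]
--     def dfs(points, start, remain, build, res):
--         if start >= len(points) or len(build) > 4 or remain < 0:
--             return
--         if remain == 0 and len(build) == 4:
--             res.append(build[:])
--             return
--         for i in range(start, len(points)):
--             build.append(points[i])
--             dfs(points, i, remain - points[i], build, res)
--             build.pop()
--
--     res = []
--     dfs(points, 0, total, [], res)
--     return res
-- ===== SOURCE B (Python) =====
-- def football_score_combinations(total):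
--     pts = [2, 3, 6, 7, 8]
--     combos = [[pts[i], pts[j], pts[k], pts[l]]
--               for i in range(5)
--               for j in range(i, 5)
--               for k in range(j, 5)
--               for l in range(k, 5)]
--     return [c for c in combos if sum(c) == total]
-- ===== Notes on version B (the rewrite author's own statement) =====
-- stated objective: simpler
-- what changed: Replaces the recursive backtracking DFS (mutable build/res accumulators, pruning guards) with a direct comprehension over four ordered index loops that enumerates the non-decreasing quadruples in the same lexicographic order and keeps those summing to total.
import Mathlib
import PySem

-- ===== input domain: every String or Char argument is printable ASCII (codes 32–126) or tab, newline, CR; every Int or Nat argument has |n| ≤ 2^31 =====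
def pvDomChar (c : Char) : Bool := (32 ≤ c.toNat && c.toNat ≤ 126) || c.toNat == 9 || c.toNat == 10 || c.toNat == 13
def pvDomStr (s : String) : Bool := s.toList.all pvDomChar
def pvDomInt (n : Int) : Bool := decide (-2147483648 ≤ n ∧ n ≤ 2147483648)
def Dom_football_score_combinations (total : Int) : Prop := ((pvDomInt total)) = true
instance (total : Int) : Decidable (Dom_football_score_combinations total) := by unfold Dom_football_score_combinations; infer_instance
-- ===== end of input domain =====

-- B replaces A's recursive backtracking DFS by a direct comprehension over four
-- ordered index loops enumerating the same combinations in the same order; objective: simpler.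

-- ===== PORT A =====
-- literal port of the inner dfs; `fuel` is only a totality guard (6 suffices, since
-- the recursion depth is bounded by the `len(build) > 4` cut-off).
def pvDfs (fuel : Nat) (points : List Int) (start : Nat) (remain : Int)
    (build : List Int) (res : List (List Int)) : List (List Int) :=
  match fuel with
  | 0 => res
  | fuel + 1 =>
    if start ≥ points.length ∨ build.length > 4 ∨ remain < 0 then res
    else if remain = 0 ∧ build.length = 4 then res ++ [build]
    else
      -- for i in range(start, len(points)): build.append(points[i]); dfs(...); build.pop()
      (List.range' start (points.length - start)).foldl
        (fun r i => pvDfs fuel points i (remain - points.getD i 0) (build ++ [points.getD i 0]) r)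
        res

def football_score_combinations (total : Int) : List (List Int) :=
  pvDfs 6 [2, 3, 6, 7, 8] 0 total [] []

-- ===== PORT B =====
def football_score_combinations_alt (total : Int) : List (List Int) :=
  let pts : List Int := [2, 3, 6, 7, 8]
  let combos : List (List Int) :=
    (List.range 5).flatMap (fun i =>
      (List.range' i (5 - i)).flatMap (fun j =>
        (List.range' j (5 - j)).flatMap (fun k =>
          (List.range' k (5 - k)).map (fun l =>
            [pts.getD i 0, pts.getD j 0, pts.getD k 0, pts.getD l 0]))))
  combos.filter (fun c => c.sum == total)

-- ===== PRECONDITION & SPEC =====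
def Spec_football_score_combinations (total : Int) (out : List (List Int)) : Prop := out = football_score_combinations_alt total
instance (total : Int) (out : List (List Int)) : Decidable (Spec_football_score_combinations total out) := by unfold Spec_football_score_combinations; infer_instance

-- ===== CLAIM (what is proved, stated in full; the proofs are below) =====
def Claim_equal_football_score_combinations : Prop := ∀ (total : Int), Dom_football_score_combinations total → Spec_football_score_combinations total (football_score_combinations total)

-- ===== LEMMAS AND PROOFS =====

-- combinations-with-replacement (non-decreasing tuples from the points list), in
-- the lexicographic order both programs produce; proof-only ghost definition.
def pvCwr : List Int → Nat → List (List Int)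
  | _, 0 => [[]]
  | [], _ + 1 => []
  | p :: ps, k + 1 => ((pvCwr (p :: ps) k).map (p :: ·)) ++ pvCwr ps (k + 1)
termination_by l k => (k, l.length)

theorem pvCwr_sum_nonneg : ∀ (l : List Int) (k : Nat), (∀ x ∈ l, 0 ≤ x) →
    ∀ c ∈ pvCwr l k, 0 ≤ c.sum := by
  intro l k
  fun_induction pvCwr l k with
  | case1 => intro _ c hc; simp_all
  | case2 => intro _ c hc; simp at hc
  | case3 p ps k ih1 ih2 =>
    intro h c hc
    simp only [List.mem_append, List.mem_map] at hc
    rcases hc with ⟨d, hd, rfl⟩ | hc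
    · have := ih1 h d hd
      have hp := h p (by simp)
      simp; omega
    · exact ih2 (fun x hx => h x (by simp [hx])) c hc

theorem filter_map_cons (p r : Int) (L : List (List Int)) :
    (L.map (p :: ·)).filter (fun c => c.sum == r) =
    (L.filter (fun c => c.sum == r - p)).map (p :: ·) := by
  induction L with
  | nil => rfl
  | cons a t ih =>
    simp only [List.map_cons, List.filter_cons, List.sum_cons]
    have : ((p + a.sum == r)) = (a.sum == r - p) := by
      rcases Bool.eq_false_or_eq_true (a.sum == r - p) with h | h <;>
        simp_all
      omega
    simp only [this]
    by_cases hb : (a.sum == r - p) = true <;> simp [hb, ih]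

theorem pvDfs_main : ∀ (k fuel start : Nat) (remain : Int) (build : List Int)
    (res : List (List Int)), build.length + k = 4 → start ≤ 4 → k + 2 ≤ fuel →
    pvDfs fuel [2, 3, 6, 7, 8] start remain build res =
      res ++ ((pvCwr (([2, 3, 6, 7, 8] : List Int).drop start) k).filter
        (fun c => c.sum == remain)).map (fun c => build ++ c) := by
  intro k
  induction k with
  | zero =>
    intro fuel start remain build res hlen hstart hfuel
    obtain ⟨f, rfl⟩ : ∃ f, fuel = f + 1 := ⟨fuel - 1, by omega⟩
    by_cases hr : remain < 0
    · rw [show pvDfs (f + 1) [2,3,6,7,8] start remain build res = res from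
        by simp [pvDfs, Or.inr (Or.inr hr)]]
      simp [pvCwr, List.filter, show ¬((0:Int) = remain) by omega]
    · by_cases h0 : remain = 0
      · rw [show pvDfs (f + 1) [2,3,6,7,8] start remain build res = res ++ [build] from ?_]
        · simp [pvCwr, List.filter, h0]
        · rw [show pvDfs (f + 1) [2,3,6,7,8] start remain build res =
            (if start ≥ ([2,3,6,7,8]:List Int).length ∨ build.length > 4 ∨ remain < 0 then res
             else if remain = 0 ∧ build.length = 4 then res ++ [build]
             else (List.range' start (([2,3,6,7,8]:List Int).length - start)).foldl
               (fun r i => pvDfs f [2,3,6,7,8] i (remain - ([2,3,6,7,8]:List Int).getD i 0)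
                 (build ++ [([2,3,6,7,8]:List Int).getD i 0]) r) res) from rfl]
          rw [if_neg (by simp; omega), if_pos ⟨h0, by omega⟩]
      · -- remain > 0 with a full build: the loop only makes cut-off calls
        have hone : ∀ (f' : Nat) (s : Nat) (r' : Int) (b : List Int) (r : List (List Int)),
            b.length > 4 → pvDfs f' [2,3,6,7,8] s r' b r = r := by
          intro f' s r' b r hb
          cases f' with
          | zero => rfl
          | succ f'' => simp [pvDfs, Or.inr (Or.inl hb)]
        have hid : ∀ (l : List Nat) (r : List (List Int)),
            l.foldl (fun r i => pvDfs f [2,3,6,7,8] i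
              (remain - ([2,3,6,7,8]:List Int).getD i 0)
              (build ++ [([2,3,6,7,8]:List Int).getD i 0]) r) r = r := by
          intro l
          induction l with
          | nil => intro r; rfl
          | cons a t iht =>
            intro r
            rw [List.foldl_cons, hone f a _ _ r (by simp; omega)]
            exact iht r
        rw [show pvDfs (f + 1) [2,3,6,7,8] start remain build res =
            (if start ≥ ([2,3,6,7,8]:List Int).length ∨ build.length > 4 ∨ remain < 0 then res
             else if remain = 0 ∧ build.length = 4 then res ++ [build]
             else (List.range' start (([2,3,6,7,8]:List Int).length - start)).foldl
               (fun r i => pvDfs f [2,3,6,7,8] i (remain - ([2,3,6,7,8]:List Int).getD i 0)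
                 (build ++ [([2,3,6,7,8]:List Int).getD i 0]) r) res) from rfl]
        rw [if_neg (by simp; omega), if_neg (by simp [h0])]
        rw [hid]
        simp [pvCwr, List.filter, show ¬((0:Int) = remain) from fun h => h0 h.symm]
  | succ k ih =>
    intro fuel start remain build res hlen hstart hfuel
    obtain ⟨f, rfl⟩ : ∃ f, fuel = f + 1 := ⟨fuel - 1, by omega⟩
    rw [show pvDfs (f + 1) [2,3,6,7,8] start remain build res =
        (if start ≥ ([2,3,6,7,8]:List Int).length ∨ build.length > 4 ∨ remain < 0 then res
         else if remain = 0 ∧ build.length = 4 then res ++ [build]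
         else (List.range' start (([2,3,6,7,8]:List Int).length - start)).foldl
           (fun r i => pvDfs f [2,3,6,7,8] i (remain - ([2,3,6,7,8]:List Int).getD i 0)
             (build ++ [([2,3,6,7,8]:List Int).getD i 0]) r) res) from rfl]
    by_cases hr : remain < 0
    · rw [if_pos (Or.inr (Or.inr hr))]
      have hnil : ((pvCwr (([2,3,6,7,8]:List Int).drop start) (k+1)).filter
          (fun c => c.sum == remain)) = [] := by
        refine List.filter_eq_nil_iff.mpr (fun c hc => ?_)
        have h0 : (0:Int) ≤ c.sum := by
          refine pvCwr_sum_nonneg _ _ (fun x hx => ?_) c hc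
          have := List.mem_of_mem_drop hx
          simp at this
          rcases this with h|h|h|h|h <;> omega
        simp; omega
      rw [hnil]; simp
    · rw [if_neg (by simp; omega), if_neg (by omega)]
      interval_cases start <;>
      · norm_num [List.range']
        rw [ih f 4 _ _ _ (by simp; omega) (by omega) (by omega)]
        try rw [ih f 3 _ _ _ (by simp; omega) (by omega) (by omega)]
        try rw [ih f 2 _ _ _ (by simp; omega) (by omega) (by omega)]
        try rw [ih f 1 _ _ _ (by simp; omega) (by omega) (by omega)]
        try rw [ih f 0 _ _ _ (by simp; omega) (by omega) (by omega)]
        simp [pvCwr, List.filter_append, filter_map_cons, List.map_map,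
          List.map_append, List.append_assoc, Function.comp_def]

theorem alt_eq_cwr (total : Int) :
    football_score_combinations_alt total =
      (pvCwr [2, 3, 6, 7, 8] 4).filter (fun c => c.sum == total) := by
  have h1 : (let pts : List Int := [2, 3, 6, 7, 8]
      (List.range 5).flatMap (fun i =>
        (List.range' i (5 - i)).flatMap (fun j =>
          (List.range' j (5 - j)).flatMap (fun k =>
            (List.range' k (5 - k)).map (fun l =>
              [pts.getD i 0, pts.getD j 0, pts.getD k 0, pts.getD l 0])))))
      = ([[2, 2, 2, 2], [2, 2, 2, 3], [2, 2, 2, 6], [2, 2, 2, 7], [2, 2, 2, 8], [2, 2, 3, 3], [2, 2, 3, 6], [2, 2, 3, 7], [2, 2, 3, 8], [2, 2, 6, 6], [2, 2, 6, 7], [2, 2, 6, 8], [2, 2, 7, 7], [2, 2, 7, 8], [2, 2, 8, 8], [2, 3, 3, 3], [2, 3, 3, 6], [2, 3, 3, 7], [2, 3, 3, 8], [2, 3, 6, 6], [2, 3, 6, 7], [2, 3, 6, 8], [2, 3, 7, 7], [2, 3, 7, 8], [2, 3, 8, 8], [2, 6, 6, 6], [2, 6, 6, 7], [2, 6, 6,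 8], [2, 6, 7, 7], [2, 6, 7, 8], [2, 6, 8, 8], [2, 7, 7, 7], [2, 7, 7, 8], [2, 7, 8, 8], [2, 8, 8, 8], [3, 3, 3, 3], [3, 3, 3, 6], [3, 3, 3, 7], [3, 3, 3, 8], [3, 3, 6, 6], [3, 3, 6, 7], [3, 3, 6, 8], [3, 3, 7, 7], [3, 3, 7, 8], [3, 3, 8, 8], [3, 6, 6, 6], [3, 6, 6, 7], [3, 6, 6, 8], [3, 6, 7, 7], [3, 6, 7, 8], [3, 6, 8, 8], [3, 7, 7, 7], [3, 7, 7, 8], [3, 7, 8, 8], [3, 8, 8, 8], [6, 6, 6, 6], [6, 6, 6, 7], [6, 6, 6, 8], [6, 6, 7, 7], [6, 6, 7, 8], [6, 6, 8, 8], [6, 7, 7, 7], [6, 7, 7, 8], [6, 7, 8, 8], [6, 8, 8, 8], [7, 7, 7, 7], [7, 7, 7, 8], [7, 7, 8, 8], [7, 8, 8, 8], [8, 8, 8, 8]] : List (List Int)) := by decide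
  have h2 : pvCwr [2, 3, 6, 7, 8] 4 = ([[2, 2, 2, 2], [2, 2, 2, 3], [2, 2, 2, 6], [2, 2, 2, 7], [2, 2, 2, 8], [2, 2, 3, 3], [2, 2, 3, 6], [2, 2, 3, 7], [2, 2, 3, 8], [2, 2, 6, 6], [2, 2, 6, 7], [2, 2, 6, 8], [2, 2, 7, 7], [2, 2, 7, 8], [2, 2, 8, 8], [2, 3, 3, 3], [2, 3, 3, 6], [2, 3, 3, 7], [2, 3, 3, 8], [2, 3, 6, 6], [2, 3, 6, 7], [2, 3, 6, 8], [2, 3, 7, 7], [2, 3, 7, 8], [2, 3, 8, 8], [2, 6, 6, 6], [2, 6, 6, 7], [2, 6, 6, 8], [2, 6, 7, 7], [2, 6, 7, 8], [2, 6, 8, 8], [2, 7, 7, 7], [2, 7, 7, 8], [2, 7, 8, 8], [2, 8, 8, 8], [3, 3, 3, 3], [3, 3, 3, 6], [3, 3, 3, 7], [3, 3, 3, 8], [3, 3, 6, 6], [3, 3, 6, 7], [3, 3, 6, 8], [3, 3, 7, 7], [3, 3, 7, 8], [3, 3, 8, 8], [3, 6, 6, 6], [3, 6, 6, 7], [3,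 6, 6, 8], [3, 6, 7, 7], [3, 6, 7, 8], [3, 6, 8, 8], [3, 7, 7, 7], [3, 7, 7, 8], [3, 7, 8, 8], [3, 8, 8, 8], [6, 6, 6, 6], [6, 6, 6, 7], [6, 6, 6, 8], [6, 6, 7, 7], [6, 6, 7, 8], [6, 6, 8, 8], [6, 7, 7, 7], [6, 7, 7, 8], [6, 7, 8, 8], [6, 8, 8, 8], [7, 7, 7, 7], [7, 7, 7, 8], [7, 7, 8, 8], [7, 8, 8, 8], [8, 8, 8, 8]] : List (List Int)) := by
    simp [pvCwr]
  unfold football_score_combinations_alt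
  rw [h2]
  exact congrArg (List.filter (fun c => c.sum == total)) h1

-- ===== VERDICT (by name: the statement is the Claim_ definition above) =====
theorem football_score_combinations_spec : Claim_equal_football_score_combinations := by
  intro total _
  unfold Spec_football_score_combinations football_score_combinations
  rw [pvDfs_main 4 6 0 total [] [] rfl (by omega) (by omega), alt_eq_cwr]
  simp
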